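-- pv_equiv track=rewrite | github.com/PokoRoko/vanity_tron_wallet | tron_generate.py | has_palindrome_of_depth
-- ===== SOURCE A (Python) =====
-- def has_palindrome_of_depth(s: str, depth: int, case_sensitive: bool = True) -> bool:
--     if not case_sensitive:
--         s = s.lower()
--     n = len(s)
--
--     def count_pairs(l: int, r: int) -> int:
--         pairs = 0
--         while l >= 0 and r < n and s[l] == s[r]:
--             pairs += 1
--             l -= 1
--             r += 1
--         return pairs
--
--     # Odd centers: a(b)c(b)a
--     for c in range(n):
--         if count_pairs(c - 1, c + 1) >= depth:
--             return True
--
--     # Even centers: ab|ba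
--     for c in range(n - 1):
--         if count_pairs(c, c + 1) >= depth:
--             return True
--
--     return False
-- ===== SOURCE B (Python) =====
-- def has_palindrome_of_depth(s: str, depth: int, case_sensitive: bool = True) -> bool:
--     if not case_sensitive:
--         s = s.lower()
--     if depth <= 0:
--         return len(s) > 0
--     for length in (2 * depth, 2 * depth + 1):
--         for i in range(len(s) - length + 1):
--             w = s[i:i + length]
--             if w == w[::-1]:
--                 return True
--     return False
-- ===== Notes on version B (the rewrite author's own statement) =====
-- stated objective: faster
-- what changed: Replaces A's expand-around-every-center scan (two center loops each running an inner while expansion, O(n*maxRadius), quadratic on repetitive strings) by a fixed-length sliding-window scan: a palindrome with >= depth symmetric pairs exists iff some window of length 2*depth or 2*depth+1 reads the same reversed, so B only slides windows of those two lengths (depth <= 0 reduces to the string being non-empty), never expanding past the needed depth.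
import Mathlib
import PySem

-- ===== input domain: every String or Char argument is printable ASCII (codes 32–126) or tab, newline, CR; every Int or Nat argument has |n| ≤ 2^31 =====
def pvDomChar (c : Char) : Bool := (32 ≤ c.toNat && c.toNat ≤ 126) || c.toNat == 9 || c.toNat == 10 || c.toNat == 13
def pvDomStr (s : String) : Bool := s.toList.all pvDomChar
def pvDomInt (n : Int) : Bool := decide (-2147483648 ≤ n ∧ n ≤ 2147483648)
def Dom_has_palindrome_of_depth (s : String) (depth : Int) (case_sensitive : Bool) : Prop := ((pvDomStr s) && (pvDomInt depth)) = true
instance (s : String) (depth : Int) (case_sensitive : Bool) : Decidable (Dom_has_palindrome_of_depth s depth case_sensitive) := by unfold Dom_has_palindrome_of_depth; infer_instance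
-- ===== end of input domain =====

-- B replaces A's expand-around-every-center scan (whose expansions are unbounded, quadratic
-- on repetitive strings) by a sliding-window scan over just the two window lengths 2*depth
-- and 2*depth+1, comparing each window with its reverse; return values proved equal everywhere.

-- ===== PORT A =====
-- the inner `while` of count_pairs: loop while both indices are in range and the chars match
def pvCountPairs (cs : List Char) (l r : Int) : Int :=
  if h : 0 ≤ l ∧ r < (cs.length : Int) ∧ PySem.List.pyGet? cs l = PySem.List.pyGet? cs r then
    1 + pvCountPairs cs (l - 1) (r + 1)
  else 0
termination_by ((cs.length : Int) - r).toNat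
decreasing_by
  obtain ⟨-, h2, -⟩ := h
  omega

def has_palindrome_of_depth (s : String) (depth : Int) (case_sensitive : Bool) : Bool :=
  let s' := if !case_sensitive then PySem.Str.lower s else s
  let cs := s'.toList
  let n : Int := cs.length
  -- first for-loop (odd centers), then second for-loop (even centers), else False
  ((PySem.List.pyRange 0 n 1).any fun c => decide (depth ≤ pvCountPairs cs (c - 1) (c + 1))) ||
  ((PySem.List.pyRange 0 (n - 1) 1).any fun c => decide (depth ≤ pvCountPairs cs c (c + 1)))

-- ===== PORT B =====
-- w == w[::-1]; w[::-1] is List.reverse (PySem.List.slice?_none_none_neg_one)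
def pvIsPalWindow (cs : List Char) (i L : Int) : Bool :=
  let w := PySem.List.slice cs (some i) (some (i + L))
  w == w.reverse

def has_palindrome_of_depth_alt (s : String) (depth : Int) (case_sensitive : Bool) : Bool :=
  let cs := (if !case_sensitive then PySem.Str.lower s else s).toList
  let n : Int := cs.length
  if depth ≤ 0 then decide (0 < n)
  else
    [2 * depth, 2 * depth + 1].any fun L =>
      (PySem.List.pyRange 0 (n - L + 1) 1).any fun i => pvIsPalWindow cs i L

-- ===== PRECONDITION & SPEC =====
def Spec_has_palindrome_of_depth (s : String) (depth : Int) (case_sensitive : Bool) (out : Bool) : Prop := out = has_palindrome_of_depth_alt s depth case_sensitive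
instance (s : String) (depth : Int) (case_sensitive : Bool) (out : Bool) : Decidable (Spec_has_palindrome_of_depth s depth case_sensitive out) := by unfold Spec_has_palindrome_of_depth; infer_instance

-- ===== CLAIM (what is proved, stated in full; the proofs are below) =====
def Claim_equal_has_palindrome_of_depth : Prop := ∀ (s : String) (depth : Int) (case_sensitive : Bool), Dom_has_palindrome_of_depth s depth case_sensitive → Spec_has_palindrome_of_depth s depth case_sensitive (has_palindrome_of_depth s depth case_sensitive)

-- ===== LEMMAS AND PROOFS =====

theorem pvCountPairs_nonneg (cs : List Char) (l r : Int) : 0 ≤ pvCountPairs cs l r := by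
  fun_induction pvCountPairs with
  | case1 l r h ih => omega
  | case2 l r h => simp

-- characterization of A's while loop: the count reaches d iff the first d offset pairs all
-- are in range and match
theorem pvCountPairs_ge_iff (cs : List Char) (d : Nat) :
    ∀ l r : Int, ((d : Int) ≤ pvCountPairs cs l r) ↔
      ∀ k : Nat, k < d → (0 ≤ l - k ∧ r + (k : Int) < (cs.length : Int) ∧
        PySem.List.pyGet? cs (l - k) = PySem.List.pyGet? cs (r + k)) := by
  induction d with
  | zero =>
    intro l r
    simp [pvCountPairs_nonneg]
  | succ d ih =>
    intro l r
    rw [pvCountPairs]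
    split
    · rename_i h
      constructor
      · intro hle k hk
        rcases Nat.eq_zero_or_pos k with hk0 | hk0
        · subst hk0; simpa using h
        · obtain ⟨j, rfl⟩ : ∃ j, k = j + 1 := ⟨k - 1, by omega⟩
          have hj := (ih (l - 1) (r + 1)).mp (by omega) j (by omega)
          have e1 : l - ((j : Int) + 1) = (l - 1) - (j : Int) := by ring
          have e2 : r + ((j : Int) + 1) = (r + 1) + (j : Int) := by ring
          push_cast
          rw [e1, e2]
          exact ⟨by omega, by omega, hj.2.2⟩
      · intro H
        have hd : (d : Int) ≤ pvCountPairs cs (l - 1) (r + 1) := by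
          refine (ih (l - 1) (r + 1)).mpr fun j hj => ?_
          have hj' := H (j + 1) (by omega)
          have e1 : l - ((j : Int) + 1) = (l - 1) - (j : Int) := by ring
          have e2 : r + ((j : Int) + 1) = (r + 1) + (j : Int) := by ring
          push_cast at hj'
          rw [e1, e2] at hj'
          exact ⟨by omega, by omega, hj'.2.2⟩
        omega
    · rename_i h
      constructor
      · intro hle; omega
      · intro H
        exact absurd (by simpa using H 0 (by omega)) h

-- palindromicity of a list via symmetric getElem?
theorem rev_eq_self_iff (w : List Char) :
    (w == w.reverse) = true ↔ ∀ j : Nat, j < w.length → w[j]? = w[w.length - 1 - j]? := by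
  rw [beq_iff_eq]
  constructor
  · intro h j hj
    conv_lhs => rw [h]
    rw [List.getElem?_reverse hj]
  · intro H
    apply List.ext_getElem?
    intro j
    by_cases hj : j < w.length
    · rw [List.getElem?_reverse hj]
      exact H j hj
    · rw [List.getElem?_eq_none (by omega), List.getElem?_eq_none (by simpa using (by omega : ¬ j < w.length))]
  
-- a window of B, characterized on the original list
theorem pvIsPalWindow_iff (cs : List Char) (i L : Int) (h0 : 0 ≤ i) (hL : 0 ≤ L)
    (hle : i + L ≤ (cs.length : Int)) :
    pvIsPalWindow cs i L = true ↔
      ∀ j : Nat, j < L.toNat → cs[i.toNat + j]? = cs[i.toNat + L.toNat - 1 - j]? := by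
  unfold pvIsPalWindow
  have hw : PySem.List.slice cs (some i) (some (i + L)) = (cs.drop i.toNat).take L.toNat := by
    rw [PySem.List.slice_toNat cs h0 (by omega)]
    congr 1
    omega
  rw [hw, rev_eq_self_iff]
  have hlen : ((cs.drop i.toNat).take L.toNat).length = L.toNat := by
    simp
    omega
  rw [hlen]
  have helem : ∀ j : Nat, j < L.toNat → ((cs.drop i.toNat).take L.toNat)[j]? = cs[i.toNat + j]? := by
    intro j hj
    rw [List.getElem?_take_of_lt hj, List.getElem?_drop]
  constructor
  · intro H j hj
    have := H j hj
    rw [helem j hj, helem _ (by omega)] at this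
    have e : i.toNat + (L.toNat - 1 - j) = i.toNat + L.toNat - 1 - j := by omega
    rwa [e] at this
  · intro H j hj
    rw [helem j hj, helem _ (by omega)]
    have e : i.toNat + (L.toNat - 1 - j) = i.toNat + L.toNat - 1 - j := by omega
    rw [e]
    exact H j hj

-- odd centers ↔ windows of length 2d+1
theorem odd_iff (cs : List Char) (d : Nat) (hd : 1 ≤ d) :
    (∃ c : Int, 0 ≤ c ∧ c < (cs.length : Int) ∧ (d : Int) ≤ pvCountPairs cs (c - 1) (c + 1)) ↔
    (∃ i : Int, 0 ≤ i ∧ i < (cs.length : Int) - (2 * d + 1) + 1 ∧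
      pvIsPalWindow cs i (2 * d + 1) = true) := by
  constructor
  · rintro ⟨c, hc0, hcn, hcp⟩
    have H := (pvCountPairs_ge_iff cs d (c - 1) (c + 1)).mp hcp
    have hk := H (d - 1) (by omega)
    have hcd : (d : Int) ≤ c := by omega
    have hcdn : c + d < (cs.length : Int) := by omega
    refine ⟨c - d, by omega, by omega, ?_⟩
    rw [pvIsPalWindow_iff cs (c - d) (2 * d + 1) (by omega) (by omega) (by omega)]
    intro j hj
    have hj' : j < 2 * d + 1 := by omega
    rcases Nat.lt_trichotomy j d with hlt | rfl | hgt
    · have e := (H (d - 1 - j) (by omega)).2.2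
      rw [PySem.List.pyGet?_of_nonneg cs (by omega), PySem.List.pyGet?_of_nonneg cs (by omega)] at e
      have i1 : (c - (d : Int)).toNat + j = ((c - 1) - ((d - 1 - j : Nat) : Int)).toNat := by omega
      have i2 : (c - (d : Int)).toNat + (2 * (d : Int) + 1).toNat - 1 - j
          = ((c + 1) + ((d - 1 - j : Nat) : Int)).toNat := by omega
      rw [i1, i2]
      exact e
    · have i2 : (c - (j : Int)).toNat + (2 * (j : Int) + 1).toNat - 1 - j
          = (c - (j : Int)).toNat + j := by omega
      rw [i2]
    · have e := (H (j - d - 1) (by omega)).2.2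
      rw [PySem.List.pyGet?_of_nonneg cs (by omega), PySem.List.pyGet?_of_nonneg cs (by omega)] at e
      have i1 : (c - (d : Int)).toNat + j = ((c + 1) + ((j - d - 1 : Nat) : Int)).toNat := by omega
      have i2 : (c - (d : Int)).toNat + (2 * (d : Int) + 1).toNat - 1 - j
          = ((c - 1) - ((j - d - 1 : Nat) : Int)).toNat := by omega
      rw [i1, i2]
      exact e.symm
  · rintro ⟨i, hi0, hin, hpal⟩
    have hin' : i + (2 * (d : Int) + 1) ≤ (cs.length : Int) := by omega
    rw [pvIsPalWindow_iff cs i (2 * d + 1) hi0 (by omega) hin'] at hpal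
    refine ⟨i + d, by omega, by omega, ?_⟩
    rw [pvCountPairs_ge_iff]
    intro k hk
    refine ⟨by omega, by omega, ?_⟩
    have e := hpal (d - 1 - k) (by omega)
    rw [PySem.List.pyGet?_of_nonneg cs (by omega), PySem.List.pyGet?_of_nonneg cs (by omega)]
    have i1 : ((i + (d : Int) - 1) - (k : Int)).toNat = i.toNat + (d - 1 - k) := by omega
    have i2 : ((i + (d : Int) + 1) + (k : Int)).toNat
        = i.toNat + (2 * (d : Int) + 1).toNat - 1 - (d - 1 - k) := by omega
    rw [i1, i2]
    exact e

theorem even_iff (cs : List Char) (d : Nat) (hd : 1 ≤ d) :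
    (∃ c : Int, 0 ≤ c ∧ c < (cs.length : Int) - 1 ∧ (d : Int) ≤ pvCountPairs cs c (c + 1)) ↔
    (∃ i : Int, 0 ≤ i ∧ i < (cs.length : Int) - (2 * d) + 1 ∧
      pvIsPalWindow cs i (2 * d) = true) := by
  constructor
  · rintro ⟨c, hc0, hcn, hcp⟩
    have H := (pvCountPairs_ge_iff cs d c (c + 1)).mp hcp
    have hk := H (d - 1) (by omega)
    have hcd : (d : Int) - 1 ≤ c := by omega
    have hcdn : c + d < (cs.length : Int) := by omega
    refine ⟨c - d + 1, by omega, by omega, ?_⟩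
    rw [pvIsPalWindow_iff cs (c - d + 1) (2 * d) (by omega) (by omega) (by omega)]
    intro j hj
    have hj' : j < 2 * d := by omega
    rcases Nat.lt_or_ge j d with hlt | hge
    · have e := (H (d - 1 - j) (by omega)).2.2
      rw [PySem.List.pyGet?_of_nonneg cs (by omega), PySem.List.pyGet?_of_nonneg cs (by omega)] at e
      have i1 : (c - (d : Int) + 1).toNat + j = (c - ((d - 1 - j : Nat) : Int)).toNat := by omega
      have i2 : (c - (d : Int) + 1).toNat + (2 * (d : Int)).toNat - 1 - j
          = ((c + 1) + ((d - 1 - j : Nat) : Int)).toNat := by omega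
      rw [i1, i2]
      exact e
    · have e := (H (j - d) (by omega)).2.2
      rw [PySem.List.pyGet?_of_nonneg cs (by omega), PySem.List.pyGet?_of_nonneg cs (by omega)] at e
      have i1 : (c - (d : Int) + 1).toNat + j = ((c + 1) + ((j - d : Nat) : Int)).toNat := by omega
      have i2 : (c - (d : Int) + 1).toNat + (2 * (d : Int)).toNat - 1 - j
          = (c - ((j - d : Nat) : Int)).toNat := by omega
      rw [i1, i2]
      exact e.symm
  · rintro ⟨i, hi0, hin, hpal⟩
    have hin' : i + (2 * (d : Int)) ≤ (cs.length : Int) := by omega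
    rw [pvIsPalWindow_iff cs i (2 * d) hi0 (by omega) hin'] at hpal
    refine ⟨i + d - 1, by omega, by omega, ?_⟩
    rw [pvCountPairs_ge_iff]
    intro k hk
    refine ⟨by omega, by omega, ?_⟩
    have e := hpal (d - 1 - k) (by omega)
    rw [PySem.List.pyGet?_of_nonneg cs (by omega), PySem.List.pyGet?_of_nonneg cs (by omega)]
    have i1 : ((i + (d : Int) - 1) - (k : Int)).toNat = i.toNat + (d - 1 - k) := by omega
    have i2 : ((i + (d : Int) - 1 + 1) + (k : Int)).toNat
        = i.toNat + (2 * (d : Int)).toNat - 1 - (d - 1 - k) := by omega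
    rw [i1, i2]
    exact e

-- the whole equality, over the already case-folded character list
theorem pv_main_eq (cs : List Char) (depth : Int) :
    (((PySem.List.pyRange 0 (cs.length : Int) 1).any fun c =>
        decide (depth ≤ pvCountPairs cs (c - 1) (c + 1))) ||
     ((PySem.List.pyRange 0 ((cs.length : Int) - 1) 1).any fun c =>
        decide (depth ≤ pvCountPairs cs c (c + 1)))) =
    (if depth ≤ 0 then decide ((0 : Int) < (cs.length : Int))
     else [2 * depth, 2 * depth + 1].any fun L =>
       (PySem.List.pyRange 0 ((cs.length : Int) - L + 1) 1).any fun i =>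
         pvIsPalWindow cs i L) := by
  rw [Bool.eq_iff_iff]
  simp only [Bool.or_eq_true, List.any_eq_true, decide_eq_true_eq,
    PySem.List.mem_pyRange_one]
  by_cases hdep : depth ≤ 0
  · rw [if_pos hdep]
    simp only [decide_eq_true_eq]
    constructor
    · rintro (⟨c, ⟨h1, h2⟩, -⟩ | ⟨c, ⟨h1, h2⟩, -⟩) <;> omega
    · intro h
      exact Or.inl ⟨0, ⟨le_refl 0, h⟩, le_trans hdep (pvCountPairs_nonneg _ _ _)⟩
  · rw [if_neg hdep]
    simp only [List.any_cons, List.any_nil, Bool.or_false, Bool.or_eq_true,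
      List.any_eq_true, PySem.List.mem_pyRange_one]
    obtain ⟨d, hd, hd1⟩ : ∃ d : Nat, (d : Int) = depth ∧ 1 ≤ d :=
      ⟨depth.toNat, by omega, by omega⟩
    rw [← hd]
    have HO := odd_iff cs d hd1
    have HE := even_iff cs d hd1
    constructor
    · rintro (⟨c, ⟨h1, h2⟩, h3⟩ | ⟨c, ⟨h1, h2⟩, h3⟩)
      · obtain ⟨i, a, b, p⟩ := HO.mp ⟨c, h1, h2, h3⟩
        exact Or.inr ⟨i, ⟨a, by omega⟩, p⟩
      · obtain ⟨i, a, b, p⟩ := HE.mp ⟨c, h1, h2, h3⟩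
        exact Or.inl ⟨i, ⟨a, by omega⟩, p⟩
    · rintro (⟨i, ⟨h1, h2⟩, h3⟩ | ⟨i, ⟨h1, h2⟩, h3⟩)
      · obtain ⟨c, a, b, p⟩ := HE.mpr ⟨i, h1, by omega, h3⟩
        exact Or.inr ⟨c, ⟨a, b⟩, p⟩
      · obtain ⟨c, a, b, p⟩ := HO.mpr ⟨i, h1, by omega, h3⟩
        exact Or.inl ⟨c, ⟨a, b⟩, p⟩

-- ===== VERDICT (by name: the statement is the Claim_ definition above) =====
theorem has_palindrome_of_depth_spec : Claim_equal_has_palindrome_of_depth := by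
  intro s depth case_sensitive _dom
  unfold Spec_has_palindrome_of_depth has_palindrome_of_depth has_palindrome_of_depth_alt
  exact pv_main_eq ((if !case_sensitive then PySem.Str.lower s else s).toList) depth
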